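-- pv_equiv track=rewrite | github.com/goose222/ChinaVis2021 | server.py | air_condiction_IAQI
-- ===== SOURCE A (Python) =====
-- IAQI_dict={
--     'so2':[0,50,150,475,800,1600,2100,2620],
--     'no2':[0,40,80,180,280,565,750,940],
--     'pm10':[0,50,150,250,350,420,500,600],
--     'pm2_5':[0,35,75,115,150,250,350,500],
--     'co':[0,2,4,14,24,36,48,60],
--     'o3':[0,160,200,300,400,800,1000,1200]
-- }
--
-- def air_condiction_IAQI(type,value):
--     num=0
--     for i in IAQI_dict[type]:
--         if value<i:
--             return num
--         else:
--             num+=1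
--     return num
-- ===== SOURCE B (Python) =====
-- IAQI_dict={
--     'so2':[0,50,150,475,800,1600,2100,2620],
--     'no2':[0,40,80,180,280,565,750,940],
--     'pm10':[0,50,150,250,350,420,500,600],
--     'pm2_5':[0,35,75,115,150,250,350,500],
--     'co':[0,2,4,14,24,36,48,60],
--     'o3':[0,160,200,300,400,800,1000,1200]
-- }
--
-- def air_condiction_IAQI(type, value):
--     # binary search (bisect_right) over the sorted threshold list
--     levels = IAQI_dict[type]
--     lo, hi = 0, len(levels)
--     while lo < hi:
--         mid = (lo + hi) // 2
--         if value < levels[mid]: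
--             hi = mid
--         else:
--             lo = mid + 1
--     return lo
-- ===== Notes on version B (the rewrite author's own statement) =====
-- stated objective: alternative
-- what changed: Replaced the linear accumulating scan over the threshold list with a hand-written bisect_right binary search (lo/hi loop) over the same sorted list.
import Mathlib
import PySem

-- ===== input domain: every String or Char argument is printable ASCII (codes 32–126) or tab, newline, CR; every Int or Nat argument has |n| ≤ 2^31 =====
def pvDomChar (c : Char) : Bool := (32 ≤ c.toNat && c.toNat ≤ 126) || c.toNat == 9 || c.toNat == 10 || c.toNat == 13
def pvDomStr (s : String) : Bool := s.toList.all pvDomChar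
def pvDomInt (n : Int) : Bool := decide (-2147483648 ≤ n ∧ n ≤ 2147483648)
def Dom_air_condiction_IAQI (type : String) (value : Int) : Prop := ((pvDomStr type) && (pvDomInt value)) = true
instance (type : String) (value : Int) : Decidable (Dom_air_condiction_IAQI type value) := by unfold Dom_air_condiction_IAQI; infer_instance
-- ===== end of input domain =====

-- ===== PORT A =====
-- B replaces A's linear accumulating scan with a binary search (bisect_right); equal return values on Pre_ (type is a key of IAQI_dict).

def IAQI_dict : PySem.Dict String (List Int) := PySem.Dict.ofList
  [("so2",  [0, 50, 150, 475, 800, 1600, 2100, 2620]),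
   ("no2",  [0, 40, 80, 180, 280, 565, 750, 940]),
   ("pm10", [0, 50, 150, 250, 350, 420, 500, 600]),
   ("pm2_5",[0, 35, 75, 115, 150, 250, 350, 500]),
   ("co",   [0, 2, 4, 14, 24, 36, 48, 60]),
   ("o3",   [0, 160, 200, 300, 400, 800, 1000, 1200])]

-- A's for-loop: count thresholds until the first one exceeding value, returning early.
def scanA (value : Int) : List Int → Int → Int
  | [], num => num
  | i :: rest, num => if value < i then num else scanA value rest (num + 1)

def air_condiction_IAQI (type : String) (value : Int) : Int :=
  match PySem.Dict.get? IAQI_dict type with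
  | some levels => scanA value levels 0
  | none => 0   -- Python raises KeyError here; excluded by Pre_

-- ===== PORT B =====
-- Source B's while loop: lo/hi binary search (bisect_right) over the sorted list.
def bsearchB (levels : List Int) (value : Int) (lo hi : Nat) : Nat :=
  if h : lo < hi then
    let mid := (lo + hi) / 2
    if value < levels.getD mid 0 then bsearchB levels value lo mid
    else bsearchB levels value (mid + 1) hi
  else lo
termination_by hi - lo
decreasing_by all_goals omega

def air_condiction_IAQI_alt (type : String) (value : Int) : Int :=
  match PySem.Dict.get? IAQI_dict type with
  | some levels => (bsearchB levels value 0 levels.length : Int)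
  | none => 0   -- Python raises KeyError here; excluded by Pre_

-- ===== PRECONDITION & SPEC =====
-- Pre_ excludes exactly the inputs where the Python A raises KeyError (type not a key of IAQI_dict).
def Pre_air_condiction_IAQI (type : String) (value : Int) : Prop :=
  type = "so2" ∨ type = "no2" ∨ type = "pm10" ∨ type = "pm2_5" ∨ type = "co" ∨ type = "o3"
instance (type : String) (value : Int) : Decidable (Pre_air_condiction_IAQI type value) := by
  unfold Pre_air_condiction_IAQI; infer_instance
def pvWitness_air_condiction_IAQI : String × Int := ("pm2_5", 80)
def Spec_air_condiction_IAQI (type : String) (value : Int) (out : Int) : Prop := out = air_condiction_IAQI_alt type value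
instance (type : String) (value : Int) (out : Int) : Decidable (Spec_air_condiction_IAQI type value out) := by unfold Spec_air_condiction_IAQI; infer_instance

-- ===== CLAIM (what is proved, stated in full; the proofs are below) =====
def Claim_equal_air_condiction_IAQI : Prop := ∀ (type : String) (value : Int), Dom_air_condiction_IAQI type value → Pre_air_condiction_IAQI type value → Spec_air_condiction_IAQI type value (air_condiction_IAQI type value)

-- ===== LEMMAS AND PROOFS =====
lemma get_so2 : PySem.Dict.get? IAQI_dict "so2" = some [0, 50, 150, 475, 800, 1600, 2100, 2620] := by decide
lemma get_no2 : PySem.Dict.get? IAQI_dict "no2" = some [0, 40, 80, 180, 280, 565, 750, 940] := by decide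
lemma get_pm10 : PySem.Dict.get? IAQI_dict "pm10" = some [0, 50, 150, 250, 350, 420, 500, 600] := by decide
lemma get_pm2_5 : PySem.Dict.get? IAQI_dict "pm2_5" = some [0, 35, 75, 115, 150, 250, 350, 500] := by decide
lemma get_co : PySem.Dict.get? IAQI_dict "co" = some [0, 2, 4, 14, 24, 36, 48, 60] := by decide
lemma get_o3 : PySem.Dict.get? IAQI_dict "o3" = some [0, 160, 200, 300, 400, 800, 1000, 1200] := by decide

-- ===== VERDICT (by name: the statement is the Claim_ definition above) =====
set_option maxHeartbeats 1600000 in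
theorem air_condiction_IAQI_spec : Claim_equal_air_condiction_IAQI := by
  intro type value _ pre
  unfold Spec_air_condiction_IAQI air_condiction_IAQI air_condiction_IAQI_alt
  rcases pre with rfl | rfl | rfl | rfl | rfl | rfl
  · rw [get_so2]
    simp only [scanA, List.length_cons, List.length_nil]
    norm_num
    repeat (rw [bsearchB]; norm_num [List.getD])
    split_ifs <;> omega
  · rw [get_no2]
    simp only [scanA, List.length_cons, List.length_nil]
    norm_num
    repeat (rw [bsearchB]; norm_num [List.getD])
    split_ifs <;> omega
  · rw [get_pm10]
    simp only [scanA, List.length_cons, List.length_nil]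
    norm_num
    repeat (rw [bsearchB]; norm_num [List.getD])
    split_ifs <;> omega
  · rw [get_pm2_5]
    simp only [scanA, List.length_cons, List.length_nil]
    norm_num
    repeat (rw [bsearchB]; norm_num [List.getD])
    split_ifs <;> omega
  · rw [get_co]
    simp only [scanA, List.length_cons, List.length_nil]
    norm_num
    repeat (rw [bsearchB]; norm_num [List.getD])
    split_ifs <;> omega
  · rw [get_o3]
    simp only [scanA, List.length_cons, List.length_nil]
    norm_num
    repeat (rw [bsearchB]; norm_num [List.getD])
    split_ifs <;> omega
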